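-- pv_equiv track=rewrite | github.com/pypi-data/pypi-mirror-400 | packages/circuit_synth/circuit_synth-0.12.1-py3-none-any.whl/circuit_synth/tools/project_management/init_existing_project.py | _collect_all_subcircuits_recursive
-- ===== SOURCE A (Python) =====
-- def _collect_all_subcircuits_recursive(
--     hierarchical_tree: dict, start_circuit: str
-- ) -> set:
--     """Recursively collect all subcircuits from hierarchical tree"""
--     all_subcircuits = set()
--
--     def _recursive_collect(circuit_name: str):
--         children = hierarchical_tree.get(circuit_name, [])
--         for child in children:
--             all_subcircuits.add(child)
--             # Recursively collect children of this child
--             _recursive_collect(child)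
--
--     _recursive_collect(start_circuit)
--     return all_subcircuits
-- ===== SOURCE B (Python) =====
-- def _collect_all_subcircuits_recursive(
--     hierarchical_tree: dict, start_circuit: str
-- ) -> set:
--     """Iterative explicit-stack DFS with a visited set (each node expanded once)."""
--     visited = set()
--     stack = list(reversed(hierarchical_tree.get(start_circuit, [])))
--     while stack:
--         node = stack.pop()
--         if node not in visited:
--             visited.add(node)
--             stack.extend(reversed(hierarchical_tree.get(node, [])))
--     return visited
-- ===== Notes on version B (the rewrite author's own statement) =====
-- stated objective: alternative
-- what changed: B replaces A's unbounded nested recursion (which re-traverses every already-collected subtree, once per path) by an iterative explicit-stack DFS with a visited set, popping each node and expanding it at most once.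
import Mathlib
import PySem

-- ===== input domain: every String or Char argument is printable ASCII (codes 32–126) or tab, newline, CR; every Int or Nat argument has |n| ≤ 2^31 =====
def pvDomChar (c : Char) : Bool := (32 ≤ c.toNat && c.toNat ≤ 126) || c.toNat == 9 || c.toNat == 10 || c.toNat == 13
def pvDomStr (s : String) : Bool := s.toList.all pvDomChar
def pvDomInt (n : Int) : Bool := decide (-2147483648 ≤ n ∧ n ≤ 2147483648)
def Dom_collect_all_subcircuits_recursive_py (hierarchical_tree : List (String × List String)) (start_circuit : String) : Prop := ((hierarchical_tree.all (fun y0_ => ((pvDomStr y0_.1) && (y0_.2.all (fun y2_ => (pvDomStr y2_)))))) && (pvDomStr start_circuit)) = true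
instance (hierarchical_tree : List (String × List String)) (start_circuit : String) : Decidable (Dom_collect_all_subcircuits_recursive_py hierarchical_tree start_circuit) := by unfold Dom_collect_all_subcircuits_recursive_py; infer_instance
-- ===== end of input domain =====

-- B replaces A's unbounded nested recursion (which re-traverses already-collected subtrees)
-- by an iterative explicit-stack DFS with a visited set; the equivalence is about the returned
-- set (as its insertion-order element list).

-- hierarchical_tree.get(circuit_name, [])  (shared lookup helper of both Pythons)
def pvChildren (hierarchical_tree : List (String × List String)) (name : String) : List String :=
  PySem.Dict.getD (PySem.Dict.mk hierarchical_tree) name []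

-- ===== PORT A =====
-- A's inner _recursive_collect: for each child, add it to the set and recurse unconditionally.
-- Fuel = recursion depth; under Pre_ the depth is at most hierarchical_tree.length + 1, so the
-- fuel is never exhausted (proved below).
def pvRecA (t : List (String × List String)) : Nat → PySem.Set String → String → PySem.Set String
  | 0, s, _ => s
  | f + 1, s, name =>
      (pvChildren t name).foldl (fun s c => pvRecA t f (PySem.Set.add s c) c) s

def collect_all_subcircuits_recursive_py (hierarchical_tree : List (String × List String)) (start_circuit : String) : List String :=
  pvRecA hierarchical_tree (hierarchical_tree.length + 1) PySem.Set.empty start_circuit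

-- ===== PORT B =====
-- termination helpers for the while loop (cited by pvLoop's decreasing_by)
theorem pvFilterLt {l : List String} {p q : String → Bool} (h : ∀ x, q x = true → p x = true)
    {a : String} (ha : a ∈ l) (hpa : p a = true) (hqa : q a = false) :
    (l.filter q).length < (l.filter p).length := by
  induction l with
  | nil => cases ha
  | cons b l ih =>
    rcases List.mem_cons.1 ha with rfl | hal
    · rw [List.filter_cons_of_pos hpa, List.filter_cons_of_neg (by simp [hqa])]
      have : (l.filter q).length ≤ (l.filter p).length :=
        (List.Sublist.length_le (List.monotone_filter_right l (fun x hx => h x hx)))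
      simp only [List.length_cons]
      omega
    · by_cases hq : q b = true
      · rw [List.filter_cons_of_pos hq, List.filter_cons_of_pos (h b hq)]
        simpa using Nat.succ_lt_succ (ih hal)
      · rw [List.filter_cons_of_neg hq]
        by_cases hp : p b = true
        · rw [List.filter_cons_of_pos hp]
          exact Nat.lt_succ_of_lt (ih hal)
        · rw [List.filter_cons_of_neg hp]
          exact ih hal

theorem pvContains_add_iff {s : PySem.Set String} {x y : String} :
    PySem.Set.contains (PySem.Set.add s y) x = true ↔ x = y ∨ PySem.Set.contains s x = true := by
  unfold PySem.Set.add
  split <;> rename_i h <;> simp [PySem.Set.contains] at h ⊢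
  · rintro rfl; exact h
  · tauto

theorem pvChildren_of_not_key {t : List (String × List String)} {name : String}
    (h : ¬ name ∈ t.map Prod.fst) : pvChildren t name = [] := by
  unfold pvChildren
  apply PySem.Dict.getD_of_not_contains
  rw [PySem.Dict.contains_eq_decide_mem_keys]
  simp only [decide_eq_false_iff_not]
  intro hk
  exact h (by simpa [PySem.Dict.keys_mk, PySem.List.mem_dedup] using hk)

-- B's while loop: pop a node; if unseen, mark it and push its children (stack head = top; the
-- Python pushes reversed(children) at the end of the list, so pops see them in original order,
-- i.e. the children are prepended here).  Total by well-founded recursion on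
-- (#unvisited keys, stack length) — no fuel needed, B terminates on every input.
def pvLoop (t : List (String × List String)) (v : PySem.Set String) (stack : List String) : PySem.Set String :=
  match stack with
  | [] => v
  | node :: rest =>
    if PySem.Set.contains v node then pvLoop t v rest
    else pvLoop t (PySem.Set.add v node) (pvChildren t node ++ rest)
termination_by (((t.map Prod.fst).filter (fun k => !(PySem.Set.contains v k))).length, stack.length)
decreasing_by
  · exact Prod.Lex.right _ (by simp)
  · rename_i hnc
    by_cases hk : node ∈ t.map Prod.fst
    · apply Prod.Lex.left
      apply pvFilterLt (p := fun k => !(PySem.Set.contains v k))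
        (q := fun k => !(PySem.Set.contains (PySem.Set.add v node) k))
      · intro x hx
        show (!PySem.Set.contains v x) = true
        rcases h : PySem.Set.contains v x with _ | _
        · rfl
        · exfalso
          have h2 : PySem.Set.contains (PySem.Set.add v node) x = true :=
            (pvContains_add_iff (s := v) (x := x) (y := node)).2 (Or.inr h)
          rw [h2] at hx
          exact Bool.noConfusion hx
      · exact hk
      · simpa using hnc
      · show (!PySem.Set.contains (PySem.Set.add v node) node) = false
        have h2 : PySem.Set.contains (PySem.Set.add v node) node = true :=
          (pvContains_add_iff (s := v) (x := node) (y := node)).2 (Or.inl rfl)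
        rw [h2]
        rfl
    · have hch : pvChildren t node = [] := pvChildren_of_not_key hk
      have hfeq : ((t.map Prod.fst).filter (fun k => !(PySem.Set.contains (PySem.Set.add v node) k)))
          = ((t.map Prod.fst).filter (fun k => !(PySem.Set.contains v k))) := by
        apply List.filter_congr
        intro x hx
        have hxne : x ≠ node := fun h => hk (h ▸ hx)
        have hcc : PySem.Set.contains (PySem.Set.add v node) x = PySem.Set.contains v x := by
          rcases h : PySem.Set.contains v x with _ | _
          · rcases h2 : PySem.Set.contains (PySem.Set.add v node) x with _ | _
            · rfl
            · rcases (pvContains_add_iff (s := v) (x := x) (y := node)).1 h2 with rfl | hc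
              · exact absurd rfl hxne
              · rw [h] at hc; exact Bool.noConfusion hc
          · exact (pvContains_add_iff (s := v) (x := x) (y := node)).2 (Or.inr h)
        show (!PySem.Set.contains (PySem.Set.add v node) x) = (!PySem.Set.contains v x)
        rw [hcc]
      rw [hch, hfeq]
      exact Prod.Lex.right _ (by simp)

def collect_all_subcircuits_recursive_py_alt (hierarchical_tree : List (String × List String)) (start_circuit : String) : List String :=
  pvLoop hierarchical_tree PySem.Set.empty (pvChildren hierarchical_tree start_circuit)

-- ===== PRECONDITION & SPEC =====
-- one frontier-expansion step of the child relation (with dedup; used only to state Pre_)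
def pvStep (t : List (String × List String)) (S : List String) : List String :=
  PySem.List.dedup (S.flatMap (pvChildren t))

-- Pre_ excludes exactly the inputs on which A raises: if a cycle is reachable from start_circuit,
-- A's unmemoized recursion never terminates (RecursionError).  Acyclic reachable parts empty the
-- frontier within length+1 steps, so such inputs all satisfy Pre_.
def Pre_collect_all_subcircuits_recursive_py (hierarchical_tree : List (String × List String)) (start_circuit : String) : Prop :=
  (pvStep hierarchical_tree)^[hierarchical_tree.length + 1] [start_circuit] = []

instance (hierarchical_tree : List (String × List String)) (start_circuit : String) : Decidable (Pre_collect_all_subcircuits_recursive_py hierarchical_tree start_circuit) := by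
  unfold Pre_collect_all_subcircuits_recursive_py; infer_instance

def pvWitness_collect_all_subcircuits_recursive_py : (List (String × List String)) × String :=
  ([("main", ["a", "b"]), ("a", ["c", "b"]), ("b", ["c"])], "main")

def Spec_collect_all_subcircuits_recursive_py (hierarchical_tree : List (String × List String)) (start_circuit : String) (out : List String) : Prop := out = collect_all_subcircuits_recursive_py_alt hierarchical_tree start_circuit
instance (hierarchical_tree : List (String × List String)) (start_circuit : String) (out : List String) : Decidable (Spec_collect_all_subcircuits_recursive_py hierarchical_tree start_circuit out) := by unfold Spec_collect_all_subcircuits_recursive_py; infer_instance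

-- ===== CLAIM (what is proved, stated in full; the proofs are below) =====
def Claim_equal_collect_all_subcircuits_recursive_py : Prop := ∀ (hierarchical_tree : List (String × List String)) (start_circuit : String), Dom_collect_all_subcircuits_recursive_py hierarchical_tree start_circuit → Pre_collect_all_subcircuits_recursive_py hierarchical_tree start_circuit → Spec_collect_all_subcircuits_recursive_py hierarchical_tree start_circuit (collect_all_subcircuits_recursive_py hierarchical_tree start_circuit)

-- ===== LEMMAS AND PROOFS =====

-- A's recursion with a first-sight visited check added: the classical recursive visited-set DFS.
-- It is the proof-side bridge between A's exhaustive recursion and B's stack loop.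
def pvRecB (t : List (String × List String)) : Nat → PySem.Set String → String → PySem.Set String
  | 0, s, _ => s
  | f + 1, s, name =>
      (pvChildren t name).foldl
        (fun s c => if PySem.Set.contains s c then s else pvRecB t f (PySem.Set.add s c) c) s

-- strict descendant relation of the child map
inductive pvDesc (t : List (String × List String)) : String → String → Prop
  | base {x c : String} : c ∈ pvChildren t x → pvDesc t x c
  | step {x c y : String} : c ∈ pvChildren t x → pvDesc t c y → pvDesc t x y

theorem pvDesc_trans {t : List (String × List String)} {a b c : String}
    (h1 : pvDesc t a b) (h2 : pvDesc t b c) : pvDesc t a c := by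
  induction h1 with
  | base h => exact pvDesc.step h h2
  | step h _ ih => exact pvDesc.step h (ih h2)

-- "every chain of children from x has length ≤ f"
def pvBnd (t : List (String × List String)) : Nat → String → Prop
  | 0, _ => False
  | f + 1, x => ∀ c ∈ pvChildren t x, pvBnd t f c

theorem pvMem_add {s : PySem.Set String} {x y : String} (h : x ∈ s) : x ∈ PySem.Set.add s y := by
  unfold PySem.Set.add
  split
  · exact h
  · exact List.mem_append_left _ h

theorem pvAdd_self (s : PySem.Set String) (x : String) : x ∈ PySem.Set.add s x := by
  unfold PySem.Set.add
  split <;> rename_i h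
  · simp [PySem.Set.contains] at h
    exact h
  · simp

theorem pvContains_iff {s : PySem.Set String} {x : String} : PySem.Set.contains s x = true ↔ x ∈ s := by
  simp [PySem.Set.contains]

theorem pvAdd_of_mem {s : PySem.Set String} {x : String} (h : x ∈ s) : PySem.Set.add s x = s := by
  unfold PySem.Set.add
  simp [PySem.Set.contains, h]

theorem pvMem_add_iff {s : PySem.Set String} {x y : String} : x ∈ PySem.Set.add s y ↔ x = y ∨ x ∈ s := by
  unfold PySem.Set.add
  split <;> rename_i h <;> simp [PySem.Set.contains] at h ⊢
  · rintro rfl; exact h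
  · tauto

-- saturation: on a member whose descendants are all present, both recursions return the state unchanged
theorem pvSat (t : List (String × List String)) :
    ∀ f (s : PySem.Set String) (c : String), c ∈ s → (∀ y, pvDesc t c y → y ∈ s) →
      pvRecA t f s c = s ∧ pvRecB t f s c = s := by
  intro f
  induction f with
  | zero => intro s c _ _; exact ⟨rfl, rfl⟩
  | succ f ih =>
    intro s c hc hcl
    have hall : ∀ (l : List String), (∀ d ∈ l, d ∈ pvChildren t c) →
        l.foldl (fun s d => pvRecA t f (PySem.Set.add s d) d) s = s ∧
        l.foldl (fun s d => if PySem.Set.contains s d then s else pvRecB t f (PySem.Set.add s d) d) s = s := by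
      intro l
      induction l with
      | nil => intro _; exact ⟨rfl, rfl⟩
      | cons d l ihl =>
        intro hmem
        have hd : d ∈ s := hcl d (pvDesc.base (hmem d (by simp)))
        have hdc : ∀ y, pvDesc t d y → y ∈ s :=
          fun y hy => hcl y (pvDesc.step (hmem d (by simp)) hy)
        have hadd : PySem.Set.add s d = s := pvAdd_of_mem hd
        have hA := (ih s d hd hdc).1
        have hrest := ihl (fun x hx => hmem x (by simp [hx]))
        constructor
        · simp only [List.foldl_cons]
          rw [hadd, hA]
          exact hrest.1
        · simp only [List.foldl_cons]
          rw [if_pos (pvContains_iff.2 hd)]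
          exact hrest.2
    exact hall (pvChildren t c) (fun _ h => h)

-- main invariant lemma: along a gray path P (ancestors of name, name included), with every set
-- member either on the path or descendant-closed, the two recursions coincide and produce a
-- descendant-closed result containing everything reachable from name.
theorem pvMain (t : List (String × List String)) :
    ∀ f (name : String) (s : PySem.Set String) (P : List String),
      pvBnd t f name →
      (∀ x ∈ s, x ∈ P ∨ (∀ y, pvDesc t x y → y ∈ s)) →
      name ∈ P →
      (∀ p ∈ P, p = name ∨ pvDesc t p name) →
      (∀ x, (x = name ∨ pvDesc t name x) → ¬ pvDesc t x x) →
      pvRecA t f s name = pvRecB t f s name ∧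
      (∀ a ∈ s, a ∈ pvRecA t f s name) ∧
      (∀ x ∈ pvRecA t f s name, x ∈ P ∨ (∀ y, pvDesc t x y → y ∈ pvRecA t f s name)) ∧
      (∀ y, pvDesc t name y → y ∈ pvRecA t f s name) := by
  intro f
  induction f with
  | zero => intro name s P hbnd; exact absurd hbnd (by simp [pvBnd])
  | succ f ih =>
    intro name s P hbnd hinv hnameP hanc hnc
    -- inner induction over the (suffix of the) children list
    have inner : ∀ (l : List String), (∀ d ∈ l, d ∈ pvChildren t name) → ∀ s,
        (∀ x ∈ s, x ∈ P ∨ (∀ y, pvDesc t x y → y ∈ s)) →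
        (l.foldl (fun s c => pvRecA t f (PySem.Set.add s c) c) s =
         l.foldl (fun s c => if PySem.Set.contains s c then s else pvRecB t f (PySem.Set.add s c) c) s) ∧
        (∀ a ∈ s, a ∈ l.foldl (fun s c => pvRecA t f (PySem.Set.add s c) c) s) ∧
        (∀ x ∈ l.foldl (fun s c => pvRecA t f (PySem.Set.add s c) c) s,
            x ∈ P ∨ (∀ y, pvDesc t x y → y ∈ l.foldl (fun s c => pvRecA t f (PySem.Set.add s c) c) s)) ∧
        (∀ d ∈ l, d ∈ l.foldl (fun s c => pvRecA t f (PySem.Set.add s c) c) s ∧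
            (∀ y, pvDesc t d y → y ∈ l.foldl (fun s c => pvRecA t f (PySem.Set.add s c) c) s)) := by
      intro l
      induction l with
      | nil => intro _ s hs; exact ⟨rfl, fun a ha => ha, hs, by simp⟩
      | cons c l ihl =>
        intro hmem s hs
        have hedge : c ∈ pvChildren t name := hmem c (by simp)
        have hDnc : pvDesc t name c := pvDesc.base hedge
        simp only [List.foldl_cons]
        by_cases hcs : c ∈ s
        · -- c already collected: A re-traverses but adds nothing (saturation); B skips
          have hcP : ¬ c ∈ P := by
            intro hcP
            rcases hanc c hcP with rfl | hdesc
            · exact hnc c (Or.inl rfl) hDnc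
            · exact hnc c (Or.inr hDnc) (pvDesc_trans hdesc hDnc)
          have hccl : ∀ y, pvDesc t c y → y ∈ s := by
            rcases hs c hcs with h | h
            · exact absurd h hcP
            · exact h
          have hadd : PySem.Set.add s c = s := pvAdd_of_mem hcs
          have hA : pvRecA t f (PySem.Set.add s c) c = s := by
            rw [hadd]; exact (pvSat t f s c hcs hccl).1
          rw [hA, if_pos (pvContains_iff.2 hcs)]
          have hrest := ihl (fun x hx => hmem x (by simp [hx])) s hs
          refine ⟨hrest.1, hrest.2.1, hrest.2.2.1, ?_⟩
          intro d hd
          rcases List.mem_cons.1 hd with rfl | hdl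
          · exact ⟨hrest.2.1 d hcs, fun y hy => hrest.2.1 y (hccl y hy)⟩
          · exact hrest.2.2.2 d hdl
        · -- c is new: both recurse; apply the outer IH with path c :: P
          have hbc : pvBnd t f c := hbnd c hedge
          have hinv' : ∀ x ∈ PySem.Set.add s c, x ∈ c :: P ∨ (∀ y, pvDesc t x y → y ∈ PySem.Set.add s c) := by
            intro x hx
            rcases pvMem_add_iff.1 hx with rfl | hxs
            · exact Or.inl (by simp)
            · rcases hs x hxs with h | h
              · exact Or.inl (by simp [h])
              · exact Or.inr fun y hy => pvMem_add (h y hy)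
          have hanc' : ∀ p ∈ c :: P, p = c ∨ pvDesc t p c := by
            intro p hp
            rcases List.mem_cons.1 hp with rfl | hpP
            · exact Or.inl rfl
            · rcases hanc p hpP with rfl | hdesc
              · exact Or.inr hDnc
              · exact Or.inr (pvDesc_trans hdesc hDnc)
          have hnc' : ∀ x, (x = c ∨ pvDesc t c x) → ¬ pvDesc t x x := by
            intro x hx
            rcases hx with rfl | hdesc
            · exact hnc x (Or.inr hDnc)
            · exact hnc x (Or.inr (pvDesc_trans hDnc hdesc))
          obtain ⟨hEq, hSub, hInv, hCl⟩ :=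
            ih c (PySem.Set.add s c) (c :: P) hbc hinv' (by simp) hanc' hnc'
          rw [if_neg (fun h => hcs (pvContains_iff.1 h)), ← hEq]
          have hcr : c ∈ pvRecA t f (PySem.Set.add s c) c := hSub c (pvAdd_self s c)
          have hInvP : ∀ x ∈ pvRecA t f (PySem.Set.add s c) c,
              x ∈ P ∨ (∀ y, pvDesc t x y → y ∈ pvRecA t f (PySem.Set.add s c) c) := by
            intro x hx
            rcases hInv x hx with hxP | h
            · rcases List.mem_cons.1 hxP with rfl | hxP
              · exact Or.inr hCl
              · exact Or.inl hxP
            · exact Or.inr h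
          have hrest := ihl (fun x hx => hmem x (by simp [hx]))
            (pvRecA t f (PySem.Set.add s c) c) hInvP
          refine ⟨hrest.1, ?_, hrest.2.2.1, ?_⟩
          · intro a ha
            exact hrest.2.1 a (hSub a (pvMem_add ha))
          · intro d hd
            rcases List.mem_cons.1 hd with rfl | hdl
            · exact ⟨hrest.2.1 d hcr, fun y hy => hrest.2.1 y (hCl y hy)⟩
            · exact hrest.2.2.2 d hdl
    obtain ⟨hEq, hSub, hInv, hChil⟩ := inner (pvChildren t name) (fun _ h => h) s hinv
    refine ⟨?_, hSub, hInv, ?_⟩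
    · simpa [pvRecA, pvRecB] using hEq
    · intro y hy
      cases hy with
      | base h => simpa [pvRecA] using (hChil _ h).1
      | step h hdesc => simpa [pvRecA] using (hChil _ h).2 y hdesc

-- B's stack loop runs the visited-set recursion: popping one node with chains bounded by f
-- performs exactly one step of pvRecB at fuel f, and a whole block of the stack folds through it.
theorem pvLoopRec (t : List (String × List String)) :
    ∀ f (c : String) (v : PySem.Set String) (rest : List String), pvBnd t f c →
      pvLoop t v (c :: rest) =
      pvLoop t (if PySem.Set.contains v c then v else pvRecB t f (PySem.Set.add v c) c) rest := by
  intro f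
  induction f with
  | zero => intro c v rest hbnd; exact absurd hbnd (by simp [pvBnd])
  | succ f ih =>
    intro c v rest hbnd
    by_cases hc : PySem.Set.contains v c
    · rw [pvLoop, if_pos hc, if_pos hc]
    · rw [pvLoop, if_neg hc, if_neg hc]
      have fold : ∀ (l : List String), (∀ d ∈ l, pvBnd t f d) → ∀ (v : PySem.Set String) (rest : List String),
          pvLoop t v (l ++ rest) =
          pvLoop t (l.foldl (fun s d => if PySem.Set.contains s d then s else pvRecB t f (PySem.Set.add s d) d) v) rest := by
        intro l
        induction l with
        | nil => intro _ v rest; rfl  -- [] ++ rest = rest, foldl [] = v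
        | cons d l ihl =>
          intro hl v rest
          rw [List.cons_append, ih d v (l ++ rest) (hl d (by simp)), List.foldl_cons]
          exact ihl (fun x hx => hl x (by simp [hx])) _ rest
      rw [fold (pvChildren t c) (fun d hd => hbnd d hd) (PySem.Set.add v c) rest]
      rfl

-- membership monotonicity of the iterated frontier
theorem pvIter_sub (t : List (String × List String)) :
    ∀ f (S S' : List String), (∀ x ∈ S, x ∈ S') →
      ∀ y ∈ (pvStep t)^[f] S, y ∈ (pvStep t)^[f] S' := by
  intro f
  induction f with
  | zero => intro S S' h y; exact h y
  | succ f ih =>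
    intro S S' h y hy
    rw [Function.iterate_succ_apply] at *
    refine ih _ _ ?_ y hy
    intro x hx
    simp only [pvStep, PySem.List.mem_dedup, List.mem_flatMap] at hx ⊢
    obtain ⟨a, ha, hxa⟩ := hx
    exact ⟨a, h a ha, hxa⟩

theorem pvBnd_of_iter (t : List (String × List String)) :
    ∀ f (x : String), (pvStep t)^[f] [x] = [] → pvBnd t f x := by
  intro f
  induction f with
  | zero => intro x h; simp at h
  | succ f ih =>
    intro x h c hc
    apply ih
    rw [Function.iterate_succ_apply] at h
    have hsub := pvIter_sub t f [c] (pvStep t [x]) (by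
      intro z hz
      simp only [List.mem_singleton] at hz
      subst hz
      simp [pvStep]
      exact hc)
    rcases h' : (pvStep t)^[f] [c] with _ | ⟨z, l⟩
    · rfl
    · exact absurd (h ▸ hsub z (by simp [h'])) (by simp)

theorem pvBnd_desc (t : List (String × List String)) {x y : String}
    (hd : pvDesc t x y) : ∀ f, pvBnd t f x → ∃ f' < f, pvBnd t f' y := by
  induction hd with
  | base h =>
    intro f hf
    cases f with
    | zero => exact absurd hf (by simp [pvBnd])
    | succ f => exact ⟨f, Nat.lt_succ_self f, hf _ h⟩
  | step h _ ih =>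
    intro f hf
    cases f with
    | zero => exact absurd hf (by simp [pvBnd])
    | succ f =>
      obtain ⟨f', hlt, hf'⟩ := ih f (hf _ h)
      exact ⟨f', Nat.lt_succ_of_lt hlt, hf'⟩

theorem pvNo_self (t : List (String × List String)) :
    ∀ f (x : String), pvBnd t f x → ¬ pvDesc t x x := by
  intro f
  induction f using Nat.strong_induction_on with
  | _ f ih =>
    intro x hf hd
    obtain ⟨f', hlt, hf'⟩ := pvBnd_desc t hd f hf
    exact ih f' hlt x hf' hd

-- the alt port equals the visited-set recursion at sufficient fuel
theorem pvAlt_eq_recB (t : List (String × List String)) (start : String)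
    (hbnd : pvBnd t (t.length + 1) start) :
    collect_all_subcircuits_recursive_py_alt t start = pvRecB t (t.length + 1) PySem.Set.empty start := by
  unfold collect_all_subcircuits_recursive_py_alt
  have fold : ∀ (l : List String), (∀ d ∈ l, pvBnd t t.length d) → ∀ (v : PySem.Set String),
      pvLoop t v l =
      l.foldl (fun s d => if PySem.Set.contains s d then s else pvRecB t t.length (PySem.Set.add s d) d) v := by
    intro l
    induction l with
    | nil =>
      intro _ v
      rw [pvLoop]
      rfl
    | cons d l ihl =>
      intro hl v
      rw [pvLoopRec t t.length d v l (hl d (by simp)), List.foldl_cons]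
      exact ihl (fun x hx => hl x (by simp [hx])) _
  rw [fold (pvChildren t start) (fun d hd => hbnd d hd) PySem.Set.empty]
  rfl

-- ===== VERDICT (by name: the statement is the Claim_ definition above) =====
theorem collect_all_subcircuits_recursive_py_spec : Claim_equal_collect_all_subcircuits_recursive_py := by
  intro t start _ hpre
  unfold Spec_collect_all_subcircuits_recursive_py
  unfold collect_all_subcircuits_recursive_py
  have hbnd : pvBnd t (t.length + 1) start := pvBnd_of_iter t _ start hpre
  have hnc : ∀ x, (x = start ∨ pvDesc t start x) → ¬ pvDesc t x x := by
    intro x hx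
    rcases hx with rfl | hdesc
    · exact pvNo_self t _ x hbnd
    · obtain ⟨f', _, hf'⟩ := pvBnd_desc t hdesc _ hbnd
      exact pvNo_self t f' x hf'
  rw [pvAlt_eq_recB t start hbnd]
  exact (pvMain t (t.length + 1) start PySem.Set.empty [start] hbnd
    (by intro x hx; simp [PySem.Set.empty] at hx) (by simp)
    (by intro p hp; simp at hp; exact Or.inl hp) hnc).1
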